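-- pv_equiv track=rewrite | github.com/YashB63/GFG-Daily-Questions | Day 410/String rp or pr/string_rp_or_pr.py | solve
-- ===== SOURCE A (Python) =====
-- def solve (X, Y, S):
--     a = 'pr'
--     b = 'rp'
--     if X < Y:
--         a, b = b, a
--         X, Y = Y, X
--
--     stack = []
--     ans = 0
--     for i in range(len(S)):
--         if stack and S[i]==a[1] and stack[-1]==a[0]:
--             stack.pop()
--             ans += X
--         else:
--             stack.append(S[i])
--
--     stack2 = []
--
--     for i in range(len(stack)):
--         if stack2 and stack[i] == b[1] and stack2[-1]==b[0]:
--             stack2.pop()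
--             ans += Y
--         else:
--             stack2.append(stack[i])
--
--     return ans
-- ===== SOURCE B (Python) =====
-- def solve(X, Y, S):
--     a, b = 'pr', 'rp'
--     if X < Y:
--         a, b = b, a
--         X, Y = Y, X
--     ans = 0
--     s = S
--     # phase 1: repeatedly delete every occurrence of the better pair
--     while a in s:
--         t = s.replace(a, '')
--         ans += (len(s) - len(t)) // 2 * X
--         s = t
--     # phase 2: same removal loop on the residue with the other pair
--     while b in s:
--         t = s.replace(b, '')
--         ans += (len(s) - len(t)) // 2 * Y
--         s = t
--     return ans
-- ===== Notes on version B (the rewrite author's own statement) =====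
-- stated objective: alternative
-- what changed: Replaces the two explicit stack passes with repeated whole-string substring deletion: each phase loops `while pair in s: s = s.replace(pair,'')`, counting removed pairs from the length drop, until the pair no longer occurs.
import Mathlib
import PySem

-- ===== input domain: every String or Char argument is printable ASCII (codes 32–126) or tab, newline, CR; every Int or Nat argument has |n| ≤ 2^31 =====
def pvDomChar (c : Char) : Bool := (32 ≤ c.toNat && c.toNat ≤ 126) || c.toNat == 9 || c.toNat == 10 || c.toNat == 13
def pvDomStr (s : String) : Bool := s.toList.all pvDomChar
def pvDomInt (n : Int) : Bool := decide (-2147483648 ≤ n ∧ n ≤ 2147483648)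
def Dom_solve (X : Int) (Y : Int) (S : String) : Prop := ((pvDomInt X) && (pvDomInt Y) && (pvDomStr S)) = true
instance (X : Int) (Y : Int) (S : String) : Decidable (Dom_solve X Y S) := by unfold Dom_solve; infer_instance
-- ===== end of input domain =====

-- B replaces A's two stack passes by repeated whole-string pair deletion (Python replace);
-- same return value, different algorithm (no speed claim). No mutation of arguments.

-- ===== PORT A =====
-- One loop iteration of A: the stack is kept top-first (Python appends/pops at the end,
-- here at the head); otherwise branch-for-branch the body of A's for-loops.
def pvStep (a0 a1 : Char) (X : Int) (p : List Char × Int) (c : Char) : List Char × Int :=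
  match p with
  | (t :: rest, ans) => if c = a1 ∧ t = a0 then (rest, ans + X) else (c :: t :: rest, ans)
  | ([], ans) => ([c], ans)

def solve (X : Int) (Y : Int) (S : String) : Int :=
  -- a = 'pr', b = 'rp'; swap if X < Y
  let (a0, a1, b0, b1, X', Y') :=
    if X < Y then ('r', 'p', 'p', 'r', Y, X) else ('p', 'r', 'r', 'p', X, Y)
  let (stack, ans) := S.toList.foldl (pvStep a0 a1 X') ([], 0)
  -- second loop walks stack bottom-to-top = reverse of the top-first list
  let (_, ans2) := stack.reverse.foldl (pvStep b0 b1 Y') ([], ans)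
  ans2

-- ===== PORT B =====
-- s.replace(a, '') for the two-character pattern a0a1: left-to-right, non-overlapping.
def pvRemoveAll (a0 a1 : Char) : List Char → List Char
  | [] => []
  | [c] => [c]
  | c :: d :: rest =>
      if c = a0 ∧ d = a1 then pvRemoveAll a0 a1 rest
      else c :: pvRemoveAll a0 a1 (d :: rest)

-- `a in s` for the two-character pattern a0a1
def pvOccurs (a0 a1 : Char) : List Char → Bool
  | [] => false
  | [_] => false
  | c :: d :: rest => (c = a0 && d = a1) || pvOccurs a0 a1 (d :: rest)

-- needed by pvRepeatStrip's termination (cited in decreasing_by)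
theorem pvRemoveAll_length_le (a0 a1 : Char) (s : List Char) :
    (pvRemoveAll a0 a1 s).length ≤ s.length := by
  induction s using pvRemoveAll.induct a0 a1 with
  | case1 => simp [pvRemoveAll]
  | case2 c => simp [pvRemoveAll]
  | case3 c d rest h ih =>
      simp only [pvRemoveAll, if_pos h, List.length_cons]; omega
  | case4 c d rest h ih =>
      simp only [List.length_cons] at ih
      simp only [pvRemoveAll, if_neg h, List.length_cons]; omega

theorem pvRemoveAll_length_lt (a0 a1 : Char) (s : List Char)
    (h : pvOccurs a0 a1 s = true) : (pvRemoveAll a0 a1 s).length < s.length := by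
  induction s using pvRemoveAll.induct a0 a1 with
  | case1 => simp [pvOccurs] at h
  | case2 c => simp [pvOccurs] at h
  | case3 c d rest hc ih =>
      have hle := pvRemoveAll_length_le a0 a1 rest
      simp only [pvRemoveAll, if_pos hc, List.length_cons]; omega
  | case4 c d rest hc ih =>
      simp only [pvOccurs, Bool.or_eq_true, Bool.and_eq_true, decide_eq_true_eq] at h
      rcases h with h | h
      · exact absurd h hc
      · have := ih h
        simp only [List.length_cons] at this
        simp only [pvRemoveAll, if_neg hc, List.length_cons]; omega

-- the `while pair in s` loop of B, accumulating ans
def pvRepeatStrip (a0 a1 : Char) (X : Int) (s : List Char) (ans : Int) : List Char × Int :=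
  if h : pvOccurs a0 a1 s = true then
    let t := pvRemoveAll a0 a1 s
    pvRepeatStrip a0 a1 X t (ans + PySem.Int.floordiv ((s.length : Int) - (t.length : Int)) 2 * X)
  else (s, ans)
termination_by s.length
decreasing_by exact pvRemoveAll_length_lt a0 a1 s h

def solve_alt (X : Int) (Y : Int) (S : String) : Int :=
  let (a0, a1, b0, b1, X', Y') :=
    if X < Y then ('r', 'p', 'p', 'r', Y, X) else ('p', 'r', 'r', 'p', X, Y)
  let (t1, ans1) := pvRepeatStrip a0 a1 X' S.toList 0
  let (_, ans2) := pvRepeatStrip b0 b1 Y' t1 ans1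
  ans2

-- ===== PRECONDITION & SPEC =====
def Spec_solve (X : Int) (Y : Int) (S : String) (out : Int) : Prop := out = solve_alt X Y S
instance (X : Int) (Y : Int) (S : String) (out : Int) : Decidable (Spec_solve X Y S out) := by unfold Spec_solve; infer_instance

-- ===== CLAIM (what is proved, stated in full; the proofs are below) =====
def Claim_equal_solve : Prop := ∀ (X : Int) (Y : Int) (S : String), Dom_solve X Y S → Spec_solve X Y S (solve X Y S)

-- ===== LEMMAS AND PROOFS =====

-- a single A-step only shifts the ans component
theorem pvStep_shift (a0 a1 : Char) (X : Int) (st : List Char) (a k : Int) (c : Char) :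
    pvStep a0 a1 X (st, a + k) c = ((pvStep a0 a1 X (st, a) c).1, (pvStep a0 a1 X (st, a) c).2 + k) := by
  cases st with
  | nil => simp [pvStep]
  | cons t rest => by_cases h : c = a1 ∧ t = a0 <;> simp [pvStep, h] <;> ring

-- one full s.replace pass is absorbed by A's stack fold, paying X per removed pair
theorem pvFold_removeAll (a0 a1 : Char) (hne : a0 ≠ a1) (X : Int) (s : List Char) :
    ∀ (st : List Char) (a : Int),
      s.foldl (pvStep a0 a1 X) (st, a)
        = (pvRemoveAll a0 a1 s).foldl (pvStep a0 a1 X)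
            (st, a + ((s.length - (pvRemoveAll a0 a1 s).length) / 2 : Nat) * X) := by
  induction s using pvRemoveAll.induct a0 a1 with
  | case1 => intro st a; simp [pvRemoveAll]
  | case2 c => intro st a; simp [pvRemoveAll]
  | case3 c d rest h ih =>
      intro st a
      have hstep1 : pvStep a0 a1 X (st, a) c = (c :: st, a) := by
        cases st with
        | nil => simp [pvStep]
        | cons t r =>
            have hcond : ¬ (c = a1 ∧ t = a0) := by
              rintro ⟨h1, _⟩; exact hne (h.1.symm.trans h1)
            simp [pvStep, hcond]
      have hstep2 : pvStep a0 a1 X (c :: st, a) d = (st, a + X) := by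
        simp [pvStep, h.1, h.2]
      calc (c :: d :: rest).foldl (pvStep a0 a1 X) (st, a)
          = rest.foldl (pvStep a0 a1 X) (st, a + X) := by
            rw [List.foldl_cons, hstep1, List.foldl_cons, hstep2]
        _ = (pvRemoveAll a0 a1 rest).foldl (pvStep a0 a1 X)
              (st, a + X + ((rest.length - (pvRemoveAll a0 a1 rest).length) / 2 : Nat) * X) :=
            ih st (a + X)
        _ = _ := by
            simp only [pvRemoveAll, if_pos h, List.length_cons]
            have hle := pvRemoveAll_length_le a0 a1 rest
            have h2 : (rest.length + 1 + 1 - (pvRemoveAll a0 a1 rest).length) / 2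
                = (rest.length - (pvRemoveAll a0 a1 rest).length) / 2 + 1 := by omega
            rw [h2]; congr 2; push_cast; ring
  | case4 c d rest h ih =>
      intro st a
      have hle := pvRemoveAll_length_le a0 a1 (d :: rest)
      have hK : ((c :: d :: rest).length - (pvRemoveAll a0 a1 (c :: d :: rest)).length) / 2
          = ((d :: rest).length - (pvRemoveAll a0 a1 (d :: rest)).length) / 2 := by
        simp only [pvRemoveAll, if_neg h, List.length_cons] at *
        omega
      calc (c :: d :: rest).foldl (pvStep a0 a1 X) (st, a)
          = (d :: rest).foldl (pvStep a0 a1 X) (pvStep a0 a1 X (st, a) c) := by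
            rw [List.foldl_cons]
        _ = (pvRemoveAll a0 a1 (d :: rest)).foldl (pvStep a0 a1 X)
              ((pvStep a0 a1 X (st, a) c).1,
               (pvStep a0 a1 X (st, a) c).2
                 + (((d :: rest).length - (pvRemoveAll a0 a1 (d :: rest)).length) / 2 : Nat) * X) := by
            rw [← ih (pvStep a0 a1 X (st, a) c).1 (pvStep a0 a1 X (st, a) c).2]
        _ = _ := by
            rw [hK]
            simp only [pvRemoveAll, if_neg h]
            rw [List.foldl_cons, pvStep_shift]

-- the guard under which an A-step is a plain push
def pvGuard (a0 a1 : Char) (t st : List Char) : Prop :=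
  match t, st with
  | c :: _, s0 :: _ => ¬ (c = a1 ∧ s0 = a0)
  | _, _ => True

-- the whole while-loop is absorbed by A's stack fold
theorem pvFold_repeatStrip (a0 a1 : Char) (hne : a0 ≠ a1) (X : Int) (s : List Char) (ans : Int) :
    ∀ (st : List Char) (a : Int),
      s.foldl (pvStep a0 a1 X) (st, a)
        = (pvRepeatStrip a0 a1 X s ans).1.foldl (pvStep a0 a1 X)
            (st, a + ((pvRepeatStrip a0 a1 X s ans).2 - ans)) := by
  induction s, ans using pvRepeatStrip.induct a0 a1 X with
  | case1 s ans h t ih =>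
      intro st a
      have hle : t.length ≤ s.length := pvRemoveAll_length_le a0 a1 s
      have hfd : PySem.Int.floordiv ((s.length : Int) - (t.length : Int)) 2
          = (((s.length - t.length) / 2 : Nat) : Int) := by
        rw [PySem.Int.floordiv_eq_ediv_of_pos (by omega)]
        omega
      have hunf : pvRepeatStrip a0 a1 X s ans
          = pvRepeatStrip a0 a1 X t (ans + PySem.Int.floordiv ((s.length : Int) - (t.length : Int)) 2 * X) := by
        rw [pvRepeatStrip, dif_pos h]
      rw [hunf]
      rw [pvFold_removeAll a0 a1 hne X s st a]
      rw [ih st (a + (((s.length - t.length) / 2 : Nat) : Int) * X)]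
      congr 2
      rw [hfd]
      ring
  | case2 s ans h =>
      intro st a
      rw [pvRepeatStrip, dif_neg h]
      simp

-- on a pair-free string the stack fold just pushes everything
theorem pvFold_no_occ (a0 a1 : Char) (X : Int) :
    ∀ (t st : List Char) (a : Int),
      pvOccurs a0 a1 t = false → pvGuard a0 a1 t st →
      t.foldl (pvStep a0 a1 X) (st, a) = (t.reverse ++ st, a) := by
  intro t
  induction t with
  | nil => intro st a _ _; simp
  | cons c rest ih =>
      intro st a hocc hguard
      have hstep : pvStep a0 a1 X (st, a) c = (c :: st, a) := by
        cases st with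
        | nil => simp [pvStep]
        | cons s0 r =>
            simp only [pvGuard] at hguard
            simp [pvStep, hguard]
      cases rest with
      | nil =>
          rw [List.foldl_cons, hstep]
          simp
      | cons d r =>
          simp only [pvOccurs, Bool.or_eq_false_iff, Bool.and_eq_false_iff,
            decide_eq_false_iff_not] at hocc
          have hocc' : pvOccurs a0 a1 (d :: r) = false := hocc.2
          have hguard' : pvGuard a0 a1 (d :: r) (c :: st) := by
            simp only [pvGuard]
            rintro ⟨h1, h2⟩
            rcases hocc.1 with h | h
            · exact h h2
            · exact h h1
          rw [List.foldl_cons, hstep, ih (c :: st) a hocc' hguard']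
          simp

-- the residue of the while-loop is pair-free
theorem pvRepeatStrip_no_occ (a0 a1 : Char) (X : Int) (s : List Char) (ans : Int) :
    pvOccurs a0 a1 (pvRepeatStrip a0 a1 X s ans).1 = false := by
  induction s, ans using pvRepeatStrip.induct a0 a1 X with
  | case1 s ans h t ih =>
      rw [pvRepeatStrip, dif_pos h]
      exact ih
  | case2 s ans h =>
      rw [pvRepeatStrip, dif_neg h]
      simpa using h

-- one phase: A's stack fold equals (residue pushed, B's accumulated ans)
theorem pvPhase (a0 a1 : Char) (hne : a0 ≠ a1) (X : Int) (l : List Char) (ans0 : Int) :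
    l.foldl (pvStep a0 a1 X) ([], ans0)
      = ((pvRepeatStrip a0 a1 X l ans0).1.reverse, (pvRepeatStrip a0 a1 X l ans0).2) := by
  have h1 := pvFold_repeatStrip a0 a1 hne X l ans0 [] ans0
  have hocc := pvRepeatStrip_no_occ a0 a1 X l ans0
  have hguard : pvGuard a0 a1 (pvRepeatStrip a0 a1 X l ans0).1 [] := by
    cases (pvRepeatStrip a0 a1 X l ans0).1 <;> simp [pvGuard]
  have h2 := pvFold_no_occ a0 a1 X (pvRepeatStrip a0 a1 X l ans0).1 []
      (ans0 + ((pvRepeatStrip a0 a1 X l ans0).2 - ans0)) hocc hguard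
  rw [h1, h2]
  simp

-- the generic two-phase equivalence
theorem pvCore (a0 a1 b0 b1 : Char) (hne : a0 ≠ a1) (hne' : b0 ≠ b1) (X Y : Int) (l : List Char) :
    (let (stack, ans) := l.foldl (pvStep a0 a1 X) ([], 0)
     let (_, ans2) := stack.reverse.foldl (pvStep b0 b1 Y) ([], ans)
     ans2)
    = (let (t1, ans1) := pvRepeatStrip a0 a1 X l 0
       let (_, ans2) := pvRepeatStrip b0 b1 Y t1 ans1
       ans2) := by
  have h1 := pvPhase a0 a1 hne X l 0
  have h2 := pvPhase b0 b1 hne' Y (pvRepeatStrip a0 a1 X l 0).1 (pvRepeatStrip a0 a1 X l 0).2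
  simp only [h1, List.reverse_reverse, h2]

-- ===== VERDICT (by name: the statement is the Claim_ definition above) =====
theorem solve_spec : Claim_equal_solve := by
  intro X Y S _
  unfold Spec_solve solve solve_alt
  by_cases hXY : X < Y <;> simp only [hXY, if_true, if_false] <;>
    exact pvCore _ _ _ _ (by decide) (by decide) _ _ S.toList
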